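-- pv_equiv track=rewrite | github.com/lmcrean/github-detective | scripts/issues/analyzer.py | _analyze_comment_distribution
-- ===== SOURCE A (Python) =====
-- from typing import List, Dict, Any
--
-- def _analyze_comment_distribution(comment_counts: List[int]) -> Dict[str, int]:
--     """Analyze distribution of comment counts."""
--     if not comment_counts:
--         return {}
--
--     return {
--         'no_comments': len([c for c in comment_counts if c == 0]),
--         'few_comments_1_5': len([c for c in comment_counts if 1 <= c <= 5]),
--         'moderate_comments_6_15': len([c for c in comment_counts if 6 <= c <= 15]),
--         'many_comments_16_plus': len([c for c in comment_counts if c >= 16]),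
--         'max_comments': max(comment_counts),
--         'min_comments': min(comment_counts)
--     }
-- ===== SOURCE B (Python) =====
-- def _analyze_comment_distribution(comment_counts):
--     """Analyze distribution of comment counts (single pass)."""
--     if not comment_counts:
--         return {}
--     no = few = mod = many = 0
--     mx = mn = comment_counts[0]
--     for c in comment_counts:
--         if c > mx:
--             mx = c
--         if c < mn:
--             mn = c
--         if c == 0:
--             no += 1
--         elif 1 <= c <= 5:
--             few += 1
--         elif 6 <= c <= 15:
--             mod += 1
--         elif c >= 16:
--             many += 1
--     return {
--         'no_comments': no,
--         'few_comments_1_5': few,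
--         'moderate_comments_6_15': mod,
--         'many_comments_16_plus': many,
--         'max_comments': mx,
--         'min_comments': mn
--     }
-- ===== Notes on version B (the rewrite author's own statement) =====
-- stated objective: faster
-- what changed: Replaced six independent passes (four filtering comprehensions plus max and min) by one loop that maintains four bucket counters and running max/min.
import Mathlib
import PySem

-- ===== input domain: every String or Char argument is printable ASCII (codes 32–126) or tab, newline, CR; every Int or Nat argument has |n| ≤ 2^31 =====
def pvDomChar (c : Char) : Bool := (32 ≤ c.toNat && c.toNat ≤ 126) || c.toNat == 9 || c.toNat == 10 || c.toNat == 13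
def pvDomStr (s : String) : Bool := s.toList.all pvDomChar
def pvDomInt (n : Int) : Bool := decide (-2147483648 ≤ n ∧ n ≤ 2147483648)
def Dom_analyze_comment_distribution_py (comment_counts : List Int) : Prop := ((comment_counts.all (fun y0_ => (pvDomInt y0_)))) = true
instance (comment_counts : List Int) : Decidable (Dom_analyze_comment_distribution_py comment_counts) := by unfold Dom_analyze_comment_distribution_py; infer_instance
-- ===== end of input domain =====

-- ===== PORT A =====
-- B replaces A's six independent passes by one loop with counters and running max/min.
def analyze_comment_distribution_py (comment_counts : List Int) : List (String × Int) :=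
  if comment_counts = [] then []
  else
    [("no_comments", ((comment_counts.filter (fun c => c == 0)).length : Int)),
     ("few_comments_1_5", ((comment_counts.filter (fun c => 1 ≤ c && c ≤ 5)).length : Int)),
     ("moderate_comments_6_15", ((comment_counts.filter (fun c => 6 ≤ c && c ≤ 15)).length : Int)),
     ("many_comments_16_plus", ((comment_counts.filter (fun c => 16 ≤ c)).length : Int)),
     ("max_comments", (PySem.List.max? comment_counts (fun x => x)).getD 0),
     ("min_comments", (PySem.List.min? comment_counts (fun x => x)).getD 0)]

-- ===== PORT B =====
-- loop body of Source B: update running max/min, then the if/elif bucket chain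
def pvBStep (s : Int × Int × Int × Int × Int × Int) (c : Int) : Int × Int × Int × Int × Int × Int :=
  let (no, few, mod_, many, mx, mn) := s
  let mx := if c > mx then c else mx
  let mn := if c < mn then c else mn
  if c = 0 then (no + 1, few, mod_, many, mx, mn)
  else if 1 ≤ c ∧ c ≤ 5 then (no, few + 1, mod_, many, mx, mn)
  else if 6 ≤ c ∧ c ≤ 15 then (no, few, mod_ + 1, many, mx, mn)
  else if 16 ≤ c then (no, few, mod_, many + 1, mx, mn)
  else (no, few, mod_, many, mx, mn)

def analyze_comment_distribution_py_alt (comment_counts : List Int) : List (String × Int) :=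
  match comment_counts with
  | [] => []
  | h :: _ =>
    let (no, few, mod_, many, mx, mn) := comment_counts.foldl pvBStep (0, 0, 0, 0, h, h)
    [("no_comments", no),
     ("few_comments_1_5", few),
     ("moderate_comments_6_15", mod_),
     ("many_comments_16_plus", many),
     ("max_comments", mx),
     ("min_comments", mn)]

-- ===== PRECONDITION & SPEC =====
def Spec_analyze_comment_distribution_py (comment_counts : List Int) (out : List (String × Int)) : Prop := out = analyze_comment_distribution_py_alt comment_counts
instance (comment_counts : List Int) (out : List (String × Int)) : Decidable (Spec_analyze_comment_distribution_py comment_counts out) := by unfold Spec_analyze_comment_distribution_py; infer_instance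

-- ===== CLAIM =====
def Claim_equal_analyze_comment_distribution_py : Prop := ∀ (comment_counts : List Int), Dom_analyze_comment_distribution_py comment_counts → Spec_analyze_comment_distribution_py comment_counts (analyze_comment_distribution_py comment_counts)

-- ===== LEMMAS AND PROOFS =====
theorem pvBStep_foldl (l : List Int) (no few mod_ many mx mn : Int) :
    l.foldl pvBStep (no, few, mod_, many, mx, mn) =
      (no + ((l.filter (fun c => c == 0)).length : Int),
       few + ((l.filter (fun c => 1 ≤ c && c ≤ 5)).length : Int),
       mod_ + ((l.filter (fun c => 6 ≤ c && c ≤ 15)).length : Int),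
       many + ((l.filter (fun c => 16 ≤ c)).length : Int),
       l.foldl max mx,
       l.foldl min mn) := by
  induction l generalizing no few mod_ many mx mn with
  | nil => simp
  | cons x t ih =>
    simp only [List.foldl_cons, List.filter_cons, pvBStep, beq_iff_eq,
      Bool.and_eq_true, decide_eq_true_eq]
    rw [show (if x > mx then x else mx) = max mx x from by omega,
        show (if x < mn then x else mn) = min mn x from by omega]
    split_ifs <;> rw [ih]
    all_goals simp only [Prod.mk.injEq, List.length_cons, Nat.cast_add, Nat.cast_one]
    all_goals first
      | trivial
      | (and_intros <;> first | trivial | omega)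

theorem analyze_comment_distribution_py_spec : Claim_equal_analyze_comment_distribution_py := by
  intro comment_counts _
  unfold Spec_analyze_comment_distribution_py
  cases comment_counts with
  | nil => rfl
  | cons h t =>
    simp only [analyze_comment_distribution_py, analyze_comment_distribution_py_alt]
    rw [pvBStep_foldl]
    simp [PySem.List.max?_id_cons, PySem.List.min?_id_cons, List.foldl_cons]
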